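-- pv_equiv track=rewrite | github.com/xuhuan9102/TheHerta4 | blueprint/node_postprocess_multifile.py | _parse_hash_values
-- ===== SOURCE A (Python) =====
-- def _parse_hash_values(hash_str):
--     hash_list = [h.strip() for h in hash_str.split(',') if h.strip()]
--
--     ib_hashes = set()
--     for hash_value in hash_list:
--         if '-' in hash_value:
--             ib_hash = hash_value.split('-')[0]
--             ib_hashes.add(ib_hash)
--         else:
--             ib_hashes.add(hash_value)
--
--     return sorted(list(ib_hashes))
-- ===== SOURCE B (Python) =====
-- def _parse_hash_values(hash_str):
--     # Single pass: maintain `result` as a sorted, duplicate-free list and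
--     # insert each prefix at its ordered position; no set, no sort call.
--     result = []
--     for h in hash_str.split(','):
--         h = h.strip()
--         if h:
--             p = h.split('-')[0] if '-' in h else h
--             i = 0
--             while i < len(result) and result[i] < p:
--                 i += 1
--             if i == len(result) or result[i] != p:
--                 result.insert(i, p)
--     return result
-- ===== Notes on version B (the rewrite author's own statement) =====
-- stated objective: alternative
-- what changed: B drops A's set and its final sorted() call entirely: it makes one pass over the comma fields and maintains the answer as a sorted duplicate-free list, inserting each prefix at its ordered position (insertion sort with adjacent-duplicate suppression).
import Mathlib
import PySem

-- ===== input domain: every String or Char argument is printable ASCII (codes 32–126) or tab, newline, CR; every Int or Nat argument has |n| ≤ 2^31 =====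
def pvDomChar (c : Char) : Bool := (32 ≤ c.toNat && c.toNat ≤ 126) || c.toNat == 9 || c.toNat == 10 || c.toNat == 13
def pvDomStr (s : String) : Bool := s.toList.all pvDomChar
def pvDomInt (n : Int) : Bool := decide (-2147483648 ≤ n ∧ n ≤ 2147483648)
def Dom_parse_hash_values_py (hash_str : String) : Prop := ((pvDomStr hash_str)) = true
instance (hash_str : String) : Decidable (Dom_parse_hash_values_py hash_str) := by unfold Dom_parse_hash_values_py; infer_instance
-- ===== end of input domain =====

-- B replaces A's set-then-sorted() pipeline by a single pass that keeps the answer as a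
-- sorted duplicate-free list, inserting each prefix at its ordered position.

-- v.split('-')[0]
def pvSplitHead (v : String) : String :=
  PySem.List.pyGetD ((PySem.Str.split? v "-").getD []) 0 ""

-- ===== PORT A =====
def parse_hash_values_py (hash_str : String) : List String :=
  let hash_list := ((PySem.Str.split? hash_str ",").getD []).filterMap
    (fun h => if PySem.Str.strip h = "" then none else some (PySem.Str.strip h))
  let ib_hashes : PySem.Set String :=
    hash_list.foldl (fun s v =>
      if PySem.Str.isIn "-" v then PySem.Set.add s (pvSplitHead v)
      else PySem.Set.add s v) PySem.Set.empty
  PySem.List.sorted ib_hashes (fun x => x) false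

-- ===== PORT B =====
-- the while-scan + conditional result.insert(i, p): scan past elements < p, then
-- insert p unless the element reached equals p (keeps the list sorted & duplicate-free)
def pvInsertUnique : List String → String → List String
  | [], p => [p]
  | x :: xs, p => if x < p then x :: pvInsertUnique xs p
                  else if x ≠ p then p :: x :: xs
                  else x :: xs

def parse_hash_values_py_alt (hash_str : String) : List String :=
  ((PySem.Str.split? hash_str ",").getD []).foldl
    (fun result h =>
      let t := PySem.Str.strip h
      if t = "" then result
      else pvInsertUnique result (if PySem.Str.isIn "-" t then pvSplitHead t else t)) []

-- ===== PRECONDITION & SPEC =====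
def Spec_parse_hash_values_py (hash_str : String) (out : List String) : Prop := out = parse_hash_values_py_alt hash_str
instance (hash_str : String) (out : List String) : Decidable (Spec_parse_hash_values_py hash_str out) := by unfold Spec_parse_hash_values_py; infer_instance

-- ===== CLAIM (what is proved, stated in full; the proofs are below) =====
def Claim_equal_parse_hash_values_py : Prop := ∀ (hash_str : String), Dom_parse_hash_values_py hash_str → Spec_parse_hash_values_py hash_str (parse_hash_values_py hash_str)

-- ===== LEMMAS AND PROOFS =====

-- the prefix both programs compute per non-empty stripped field
def pvPrefix (v : String) : String :=
  if PySem.Str.isIn "-" v then pvSplitHead v else v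

theorem mem_pvInsertUnique (l : List String) (p a : String) :
    a ∈ pvInsertUnique l p ↔ a ∈ l ∨ a = p := by
  induction l with
  | nil => simp [pvInsertUnique]
  | cons x xs ih =>
    simp only [pvInsertUnique]
    split_ifs with h1 h2
    · simp [ih]; tauto
    · simp; tauto
    · rw [not_not] at h2; subst h2; simp; tauto

theorem pairwise_pvInsertUnique (l : List String) (p : String)
    (hl : l.Pairwise (· < ·)) : (pvInsertUnique l p).Pairwise (· < ·) := by
  induction l with
  | nil => simp [pvInsertUnique]
  | cons x xs ih =>
    rw [List.pairwise_cons] at hl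
    obtain ⟨hx, hxs⟩ := hl
    simp only [pvInsertUnique]
    split_ifs with h1 h2
    · refine List.pairwise_cons.mpr ⟨?_, ih hxs⟩
      intro y hy
      rcases (mem_pvInsertUnique xs p y).mp hy with hyx | rfl
      · exact hx y hyx
      · exact h1
    · have hpx : p < x := lt_of_le_of_ne (not_lt.mp h1) (Ne.symm h2)
      refine List.pairwise_cons.mpr ⟨?_, List.pairwise_cons.mpr ⟨hx, hxs⟩⟩
      intro y hy
      rcases List.mem_cons.mp hy with rfl | hyx
      · exact hpx
      · exact lt_trans hpx (hx y hyx)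
    · exact List.pairwise_cons.mpr ⟨hx, hxs⟩

-- skipping empty stripped fields inline = folding over the filterMap'ed field list
theorem foldl_skip_eq_foldl_filterMap {α β : Type} (g : α → Option β)
    (f : List β → β → List β) (l : List α) (init : List β) :
    l.foldl (fun acc h => match g h with | none => acc | some p => f acc p) init
      = (l.filterMap g).foldl f init := by
  induction l generalizing init with
  | nil => rfl
  | cons x xs ih =>
    simp only [List.foldl_cons, List.filterMap_cons]
    cases g x <;> simp [ih]

theorem foldl_pvInsertUnique_invariant (xs : List String) (init : List String)
    (hinit : init.Pairwise (· < ·)) :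
    (xs.foldl pvInsertUnique init).Pairwise (· < ·)
      ∧ ∀ a, a ∈ xs.foldl pvInsertUnique init ↔ a ∈ init ∨ a ∈ xs := by
  induction xs generalizing init with
  | nil => exact ⟨hinit, by simp⟩
  | cons x rest ih =>
    obtain ⟨hp, hm⟩ := ih (pvInsertUnique init x) (pairwise_pvInsertUnique init x hinit)
    refine ⟨hp, fun a => ?_⟩
    rw [List.foldl_cons, hm a, mem_pvInsertUnique]
    simp [List.mem_cons]
    tauto

-- A's set-building loop is set(map(pvPrefix, hash_list))
theorem foldl_add_eq_ofList_map (l : List String) :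
    l.foldl (fun s v =>
      if PySem.Str.isIn "-" v then PySem.Set.add s (pvSplitHead v)
      else PySem.Set.add s v) PySem.Set.empty
    = PySem.Set.ofList (l.map pvPrefix) := by
  rw [PySem.Set.ofList_eq_foldl, List.foldl_map]
  apply PySem.List.foldl_congr_mem
  intro acc x _
  simp only [pvPrefix, apply_ite (PySem.Set.add acc)]

-- the heart: sorted(set(xs)) = foldl ordered-unique-insert over xs
theorem sorted_ofList_eq_foldl_insertUnique (xs : List String) :
    PySem.List.sorted (PySem.Set.ofList xs) (fun x => x) false
      = xs.foldl pvInsertUnique [] := by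
  obtain ⟨hp, hm⟩ := foldl_pvInsertUnique_invariant xs [] (by simp)
  have hnd : (xs.foldl pvInsertUnique []).Nodup := hp.imp (fun h => ne_of_lt h)
  have hperm : (xs.foldl pvInsertUnique []).Perm (PySem.Set.ofList xs) := by
    refine (List.perm_ext_iff_of_nodup hnd (PySem.Set.nodup_ofList xs)).mpr ?_
    intro a
    rw [hm a, PySem.Set.mem_ofList]
    simp
  exact PySem.List.sorted_eq_of_perm_of_pairwise_lt _ _ _ hperm hp

-- ===== VERDICT (by name: the statement is the Claim_ definition above) =====
theorem parse_hash_values_py_spec : Claim_equal_parse_hash_values_py := by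
  intro hash_str _
  unfold Spec_parse_hash_values_py parse_hash_values_py parse_hash_values_py_alt
  have hB :
      (((PySem.Str.split? hash_str ",").getD []).foldl
        (fun result h =>
          let t := PySem.Str.strip h
          if t = "" then result
          else pvInsertUnique result (if PySem.Str.isIn "-" t then pvSplitHead t else t)) [])
      = ((((PySem.Str.split? hash_str ",").getD []).filterMap
          (fun h => if PySem.Str.strip h = "" then none
                    else some (PySem.Str.strip h))).map pvPrefix).foldl pvInsertUnique [] := by
    rw [List.foldl_map,
      ← foldl_skip_eq_foldl_filterMap
        (fun h => if PySem.Str.strip h = "" then none else some (PySem.Str.strip h))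
        (fun acc v => pvInsertUnique acc (pvPrefix v))]
    apply PySem.List.foldl_congr_mem
    intro acc h _
    by_cases ht : PySem.Str.strip h = "" <;> simp [ht, pvPrefix]
  simp only [hB, foldl_add_eq_ofList_map, sorted_ofList_eq_foldl_insertUnique]
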